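-- pv_equiv track=rewrite | github.com/Brikwerk/ctqa | ctqa/audit.py | reformROIArray
-- ===== SOURCE A (Python) =====
-- def reformROIArray(data, x1, x2):
--   '''Loops through flat ROI array and turns into 2d ROI array'''
--
--   counter = 0
--   arr = []
--   tempArr = []
--   length = x2-x1
--   for i in range(len(data)):
--     if counter == length-1:
--       tempArr.append(data[i])
--       arr.append(tempArr)
--       tempArr = []
--       counter = 0
--     else:
--       tempArr.append(data[i])
--       counter = counter + 1
--
--   return arr
-- ===== SOURCE B (Python) =====
-- def reformROIArray(data, x1, x2):
--     '''Loops through flat ROI array and turns into 2d ROI array'''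
--     length = x2 - x1
--     if length <= 0:
--         return []
--     rest = list(data)
--     out = []
--     while len(rest) >= length:
--         out.append(rest[:length])
--         rest = rest[length:]
--     return out
-- ===== Notes on version B (the rewrite author's own statement) =====
-- stated objective: simpler
-- what changed: B replaces the per-element loop with counter/tempArr state by an early return for non-positive chunk length plus a while loop that peels off one full slice of the list at a time, dropping the incomplete tail.
import Mathlib
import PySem

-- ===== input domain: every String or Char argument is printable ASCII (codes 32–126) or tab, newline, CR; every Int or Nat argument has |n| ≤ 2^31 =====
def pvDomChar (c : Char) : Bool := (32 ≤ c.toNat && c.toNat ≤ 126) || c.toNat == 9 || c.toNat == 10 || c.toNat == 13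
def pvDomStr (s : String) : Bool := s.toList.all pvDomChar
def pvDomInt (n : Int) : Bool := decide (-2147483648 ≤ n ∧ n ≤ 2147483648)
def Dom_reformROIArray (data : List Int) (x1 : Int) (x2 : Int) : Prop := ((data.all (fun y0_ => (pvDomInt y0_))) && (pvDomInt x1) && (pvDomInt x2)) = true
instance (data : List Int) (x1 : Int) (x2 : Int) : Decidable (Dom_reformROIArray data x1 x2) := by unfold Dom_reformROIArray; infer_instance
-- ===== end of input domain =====

-- B replaces A's per-element counter/tempArr loop by an early return for non-positive
-- chunk length plus a while loop peeling one full slice at a time (objective: simpler).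


-- ===== PORT A =====
-- state: (counter, arr, tempArr); the for-loop over range(len(data)) reads data[i] in order,
-- so it is a fold over the elements of data
def reformROIArray (data : List Int) (x1 : Int) (x2 : Int) : List (List Int) :=
  let length := x2 - x1
  let s := data.foldl (fun (st : Int × List (List Int) × List Int) d =>
    let counter := st.1
    let arr := st.2.1
    let tempArr := st.2.2
    if counter = length - 1 then
      (0, arr ++ [tempArr ++ [d]], [])
    else
      (counter + 1, arr, tempArr ++ [d])) (0, [], [])
  s.2.1

-- ===== PORT B =====
-- the while loop: peel off rest[:length] while len(rest) >= length; 1 ≤ L is guaranteed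
-- at the call site (length > 0); the `1 ≤ L` test in the dite is a totality guard only
def chunkGo (L : Nat) (rest : List Int) : List (List Int) :=
  if _h : 1 ≤ L ∧ L ≤ rest.length then
    rest.take L :: chunkGo L (rest.drop L)
  else []
termination_by rest.length
decreasing_by simp; omega

def reformROIArray_alt (data : List Int) (x1 : Int) (x2 : Int) : List (List Int) :=
  let length := x2 - x1
  if length ≤ 0 then []
  else chunkGo length.toNat data

-- ===== PRECONDITION & SPEC =====
def Spec_reformROIArray (data : List Int) (x1 : Int) (x2 : Int) (out : List (List Int)) : Prop := out = reformROIArray_alt data x1 x2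
instance (data : List Int) (x1 : Int) (x2 : Int) (out : List (List Int)) : Decidable (Spec_reformROIArray data x1 x2 out) := by unfold Spec_reformROIArray; infer_instance

-- ===== CLAIM (what is proved, stated in full; the proofs are below) =====
def Claim_equal_reformROIArray : Prop := ∀ (data : List Int) (x1 : Int) (x2 : Int), Dom_reformROIArray data x1 x2 → Spec_reformROIArray data x1 x2 (reformROIArray data x1 x2)

-- ===== LEMMAS AND PROOFS =====

-- abbreviation for A's loop body at chunk length `len`
def stepA (len : Int) (st : Int × List (List Int) × List Int) (d : Int) : Int × List (List Int) × List Int :=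
  if st.1 = len - 1 then (0, st.2.1 ++ [st.2.2 ++ [d]], [])
  else (st.1 + 1, st.2.1, st.2.2 ++ [d])

theorem reformROIArray_eq_foldA (data : List Int) (x1 x2 : Int) :
    reformROIArray data x1 x2 = (data.foldl (stepA (x2 - x1)) (0, [], [])).2.1 := rfl

-- when length ≤ 0, the branch never fires (counter stays ≥ 0) and arr stays unchanged
theorem foldA_nonpos (len : Int) (hlen : len ≤ 0) :
    ∀ (data : List Int) (c : Int) (arr : List (List Int)) (t : List Int), 0 ≤ c →
      (data.foldl (stepA len) (c, arr, t)).2.1 = arr := by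
  intro data
  induction data with
  | nil => intro c arr t _; simp
  | cons d rest ih =>
    intro c arr t hc
    have hne : ¬ c = len - 1 := by omega
    simp only [List.foldl_cons, stepA, hne, if_false]
    exact ih (c + 1) arr (t ++ [d]) (by omega)

-- main invariant: counter = tempArr.length < L, and arr accumulates arr ++ chunkGo L (t ++ data)
theorem foldA_pos (L : Nat) (hL : 1 ≤ L) :
    ∀ (data : List Int) (arr : List (List Int)) (t : List Int), t.length < L →
      (data.foldl (stepA (L : Int)) ((t.length : Int), arr, t)).2.1
        = arr ++ chunkGo L (t ++ data) := by
  intro data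
  induction data with
  | nil =>
    intro arr t ht
    have hc : ¬ (1 ≤ L ∧ L ≤ (t ++ ([] : List Int)).length) := by simp; omega
    rw [chunkGo, dif_neg hc]
    simp
  | cons d rest ih =>
    intro arr t ht
    by_cases hfull : t.length = L - 1
    · have hcond : (t.length : Int) = (L : Int) - 1 := by omega
      simp only [List.foldl_cons, stepA]
      rw [if_pos hcond]
      have h0 : ((0 : Int), arr ++ [t ++ [d]], ([] : List Int))
          = (((List.length ([] : List Int) : Int)), arr ++ [t ++ [d]], ([] : List Int)) := by simp
      rw [h0, ih (arr ++ [t ++ [d]]) [] (by simpa using hL)]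
      have hlen2 : (t ++ d :: rest).length = L + rest.length := by simp; omega
      have hcond2 : 1 ≤ L ∧ L ≤ (t ++ d :: rest).length := ⟨hL, by omega⟩
      conv_rhs => rw [chunkGo, dif_pos hcond2]
      have htake : (t ++ d :: rest).take L = t ++ [d] := by
        have : t ++ d :: rest = (t ++ [d]) ++ rest := by simp
        rw [this, List.take_append_of_le_length (by simp; omega)]
        rw [List.take_of_length_le (by simp; omega)]
      have hdrop : (t ++ d :: rest).drop L = rest := by
        have : t ++ d :: rest = (t ++ [d]) ++ rest := by simp
        rw [this, List.drop_append_of_le_length (by simp; omega)]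
        simp [List.drop_of_length_le (show (t ++ [d]).length ≤ L by simp; omega)]
      rw [htake, hdrop]
      simp
    · have hcond : ¬ ((t.length : Int) = (L : Int) - 1) := by omega
      simp only [List.foldl_cons, stepA, hcond, if_false]
      have h1 : ((t.length : Int) + 1, arr, t ++ [d])
          = (((t ++ [d]).length : Int), arr, t ++ [d]) := by simp
      rw [h1, ih arr (t ++ [d]) (by simp; omega)]
      simp

-- ===== VERDICT (by name: the statement is the Claim_ definition above) =====
theorem reformROIArray_spec : Claim_equal_reformROIArray := by
  intro data x1 x2 _
  unfold Spec_reformROIArray reformROIArray_alt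
  rw [reformROIArray_eq_foldA]
  by_cases h : x2 - x1 ≤ 0
  · rw [if_pos h]
    exact foldA_nonpos (x2 - x1) h data 0 [] [] le_rfl
  · rw [if_neg h]
    have hL : 1 ≤ (x2 - x1).toNat := by omega
    have hcast : ((x2 - x1).toNat : Int) = x2 - x1 := by omega
    have := foldA_pos (x2 - x1).toNat hL data [] [] (by simp; omega)
    simp only [hcast] at this
    simpa using this
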